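-- pv_equiv track=rewrite | github.com/shrivarshapoojari/Network-Scanner | analyzer/log_parser.py | detect_port_scans
-- ===== SOURCE A (Python) =====
-- from collections import Counter, defaultdict
--
-- def detect_port_scans(entries):
--     """Detect port scanning attempts"""
--     ip_requests = defaultdict(set)
--
--     for entry in entries:
--         ip = entry.get('ip')
--         request = entry.get('request', '') or entry.get('raw_line', '')
--
--         if ip and request:
--             # Extract path from request
--             try:
--                 path = request.split()[1] if len(request.split()) > 1 else '/'
--                 ip_requests[ip].add(path)
--             except:
--                 continue
--
--     # Consider it a port scan if an IP requests many different paths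
--     port_scans = 0
--     for ip, paths in ip_requests.items():
--         if len(paths) > 10:  # Threshold for port scan detection
--             port_scans += 1
--
--     return port_scans
-- ===== SOURCE B (Python) =====
-- def detect_port_scans(entries):
--     """Detect port scanning attempts"""
--     # Stage 1: extract the (ip, path) event of each usable entry.
--     pairs = []
--     for entry in entries:
--         ip = entry.get('ip')
--         request = entry.get('request', '') or entry.get('raw_line', '')
--         if ip and request:
--             parts = request.split()
--             pairs.append((ip, parts[1] if len(parts) > 1 else '/'))
--
--     # Stage 2: recursive partition group-by (no dict/set-of-sets):
--     # peel off the first IP, split the pair list around it, recurse on the rest.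
--     def scan(pairs):
--         if not pairs:
--             return 0
--         ip0 = pairs[0][0]
--         mine = [p for i, p in pairs if i == ip0]
--         others = [(i, p) for i, p in pairs if i != ip0]
--         return (1 if len(set(mine)) > 10 else 0) + scan(others)
--
--     return scan(pairs)
-- ===== Notes on version B (the rewrite author's own statement) =====
-- stated objective: alternative
-- what changed: Replaces the single-pass defaultdict-of-sets with two stages: an extraction pass producing a flat (ip, path) event list, then a recursive partition group-by (quicksort-style: peel off the first IP, split the list around it, recurse on the remainder) with no dict or per-IP set maintained during the scan.
import Mathlib
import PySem

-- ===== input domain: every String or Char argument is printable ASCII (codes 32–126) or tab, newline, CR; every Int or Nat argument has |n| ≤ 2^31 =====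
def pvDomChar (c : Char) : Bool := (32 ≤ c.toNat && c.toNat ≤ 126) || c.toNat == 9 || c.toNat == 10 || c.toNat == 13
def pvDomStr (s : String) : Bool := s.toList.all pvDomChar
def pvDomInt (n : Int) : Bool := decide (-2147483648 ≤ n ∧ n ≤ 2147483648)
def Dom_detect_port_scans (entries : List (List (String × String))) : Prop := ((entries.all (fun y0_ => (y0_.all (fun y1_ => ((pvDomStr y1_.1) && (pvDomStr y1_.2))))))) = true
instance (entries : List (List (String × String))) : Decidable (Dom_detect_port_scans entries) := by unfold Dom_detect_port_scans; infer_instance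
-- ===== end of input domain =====

-- B replaces A's single-pass defaultdict-of-sets with a staged extraction pass
-- followed by a recursive partition group-by (no dict at all); objective: alternative.

-- ===== PORT A =====
-- loop body of A's 'for entry in entries'
def pvStepA (d : PySem.Dict String (PySem.Set String)) (entry : List (String × String)) :
    PySem.Dict String (PySem.Set String) :=
  let e : PySem.Dict String String := PySem.Dict.mk entry
  let ip := e.get? "ip"
  let request := if e.getD "request" "" ≠ "" then e.getD "request" "" else e.getD "raw_line" ""
  match ip with
  | some ipv =>
      if ipv ≠ "" ∧ request ≠ "" then
        -- path = request.split()[1] if len(request.split()) > 1 else '/'  (the [1] never raises here)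
        let path := if (PySem.Str.split₀ request).length > 1
                    then PySem.List.pyGetD (PySem.Str.split₀ request) 1 "/" else "/"
        d.modify ipv PySem.Set.empty (fun s => s.add path)
      else d
  | none => d

def detect_port_scans (entries : List (List (String × String))) : Int :=
  let ip_requests := entries.foldl pvStepA PySem.Dict.empty
  ip_requests.items.foldl (fun acc kv => if PySem.Set.len kv.2 > 10 then acc + 1 else acc) 0

-- ===== PORT B =====
-- Stage-1 loop body of B: append the (ip, path) event of a usable entry
def pvStepB (s : List (String × String)) (entry : List (String × String)) :
    List (String × String) :=
  let e : PySem.Dict String String := PySem.Dict.mk entry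
  let ip := e.get? "ip"
  let request := if e.getD "request" "" ≠ "" then e.getD "request" "" else e.getD "raw_line" ""
  match ip with
  | some ipv =>
      if ipv ≠ "" ∧ request ≠ "" then
        let parts := PySem.Str.split₀ request
        s ++ [(ipv, if parts.length > 1 then PySem.List.pyGetD parts 1 "/" else "/")]
      else s
  | none => s

-- Stage-2 recursion of B: peel off the first IP, partition, recurse on the rest
def pvScan : List (String × String) → Int
  | [] => 0
  | p :: rest =>
      let mine := ((p :: rest).filter (fun q => q.1 == p.1)).map Prod.snd
      let others := (p :: rest).filter (fun q => q.1 != p.1)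
      (if PySem.Set.len (PySem.Set.ofList mine) > 10 then (1 : Int) else 0) + pvScan others
termination_by l => l.length
decreasing_by
  simp only [List.filter_cons, bne_self_eq_false, List.length_cons]
  exact Nat.lt_succ_of_le (List.length_filter_le _ _)

def detect_port_scans_alt (entries : List (List (String × String))) : Int :=
  pvScan (entries.foldl pvStepB [])

-- ===== PRECONDITION & SPEC =====
def Spec_detect_port_scans (entries : List (List (String × String))) (out : Int) : Prop := out = detect_port_scans_alt entries
instance (entries : List (List (String × String))) (out : Int) : Decidable (Spec_detect_port_scans entries out) := by unfold Spec_detect_port_scans; infer_instance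

-- ===== CLAIM (what is proved, stated in full; the proofs are below) =====
def Claim_equal_detect_port_scans : Prop := ∀ (entries : List (List (String × String))), Dom_detect_port_scans entries → Spec_detect_port_scans entries (detect_port_scans entries)

-- ===== LEMMAS AND PROOFS =====

-- the (ip, path) event an entry contributes, if any (shared characterisation of both loop bodies)
def pvExtract (entry : List (String × String)) : Option (String × String) :=
  let e : PySem.Dict String String := PySem.Dict.mk entry
  let request := if e.getD "request" "" ≠ "" then e.getD "request" "" else e.getD "raw_line" ""
  match e.get? "ip" with
  | some ipv =>
      if ipv ≠ "" ∧ request ≠ "" then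
        some (ipv, if (PySem.Str.split₀ request).length > 1
                   then PySem.List.pyGetD (PySem.Str.split₀ request) 1 "/" else "/")
      else none
  | none => none

-- "this IP requested more than 10 distinct paths in the event list l"
def pvBig (l : List (String × String)) (k : String) : Bool :=
  decide (PySem.Set.len (PySem.Set.ofList ((l.filter (fun q => q.1 == k)).map Prod.snd)) > 10)

-- the common normal form both programs are reduced to
def pvKeyCount (l : List (String × String)) : Int :=
  ((PySem.Set.ofList (l.map Prod.fst)).countP (pvBig l) : Int)

lemma pvStepA_eq (d : PySem.Dict String (PySem.Set String)) (entry : List (String × String)) :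
    pvStepA d entry = match pvExtract entry with
      | some p => d.modify p.1 PySem.Set.empty (fun s => s.add p.2)
      | none => d := by
  unfold pvStepA pvExtract
  cases h : (PySem.Dict.mk entry : PySem.Dict String String).get? "ip" with
  | none => simp only [h]
  | some ipv => simp only [h]; split_ifs <;> rfl

lemma pvStepB_eq (s : List (String × String)) (entry : List (String × String)) :
    pvStepB s entry = match pvExtract entry with
      | some p => s ++ [p]
      | none => s := by
  unfold pvStepB pvExtract
  cases h : (PySem.Dict.mk entry : PySem.Dict String String).get? "ip" with
  | none => simp only [h]
  | some ipv => simp only [h]; split_ifs <;> rfl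

lemma pvFoldA (entries : List (List (String × String))) (d : PySem.Dict String (PySem.Set String)) :
    entries.foldl pvStepA d =
      (entries.filterMap pvExtract).foldl
        (fun d p => d.modify p.1 PySem.Set.empty (fun s => s.add p.2)) d := by
  induction entries generalizing d with
  | nil => rfl
  | cons e es ih =>
      rw [List.foldl_cons, List.filterMap_cons, pvStepA_eq]
      cases pvExtract e <;> simp [ih]

lemma pvFoldB (entries : List (List (String × String))) (s : List (String × String)) :
    entries.foldl pvStepB s = s ++ entries.filterMap pvExtract := by
  induction entries generalizing s with
  | nil => simp
  | cons e es ih =>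
      rw [List.foldl_cons, List.filterMap_cons, pvStepB_eq]
      cases pvExtract e <;> simp [ih]

-- the per-key content of A's grouping fold
lemma pvGetD_group (l : List (String × String)) (d : PySem.Dict String (PySem.Set String)) (k : String) :
    (l.foldl (fun d p => d.modify p.1 PySem.Set.empty (fun s => s.add p.2)) d).getD k PySem.Set.empty
      = PySem.Set.update (d.getD k PySem.Set.empty)
          ((l.filter (fun p => p.1 == k)).map Prod.snd) := by
  induction l generalizing d with
  | nil => simp [PySem.Set.update_nil]
  | cons p l ih =>
      rw [List.foldl_cons, ih, PySem.Dict.getD_modify]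
      by_cases h : p.1 = k
      · simp [h, PySem.Set.update_cons]
      · simp [Ne.symm h, h]

lemma pvOfList_filter {α : Type} [BEq α] [LawfulBEq α] (l : List α) (p : α → Bool) :
    (PySem.Set.ofList l).filter p = PySem.Set.ofList (l.filter p) := by
  induction l using List.reverseRecOn with
  | nil => rfl
  | append_singleton l x ih =>
      rw [PySem.Set.ofList_append_singleton, List.filter_append]
      by_cases h : x ∈ l
      · have hx : x ∈ PySem.Set.ofList l := (PySem.Set.mem_ofList l x).mpr h
        rw [PySem.Set.add_of_mem hx, ih]
        by_cases hp : p x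
        · have hxf : x ∈ PySem.Set.ofList (l.filter p) :=
            (PySem.Set.mem_ofList _ x).mpr (List.mem_filter.mpr ⟨h, hp⟩)
          simp only [List.filter_cons, hp, if_true, List.filter_nil]
          rw [PySem.Set.ofList_append_singleton, PySem.Set.add_of_mem hxf]
        · simp [hp]
      · have hx : x ∉ PySem.Set.ofList l := fun hc => h ((PySem.Set.mem_ofList l x).mp hc)
        rw [PySem.Set.add_of_not_mem hx, List.filter_append, ih]
        by_cases hp : p x
        · have hxf : x ∉ PySem.Set.ofList (l.filter p) := fun hc =>
            h (List.mem_filter.mp ((PySem.Set.mem_ofList _ x).mp hc)).1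
          simp only [List.filter_cons, hp, if_true, List.filter_nil]
          rw [PySem.Set.ofList_append_singleton, PySem.Set.add_of_not_mem hxf]
        · simp [hp]

-- a fold that adds an indicator = countP
lemma pvFoldl_count (ks : List String) (c : String → Bool) (a : Int) :
    ks.foldl (fun acc k => if c k then acc + 1 else acc) a = a + (ks.countP c : Int) := by
  induction ks generalizing a with
  | nil => simp
  | cons k ks ih =>
      rw [List.foldl_cons, List.countP_cons]
      by_cases h : c k <;> simp [h, ih] <;> push_cast
      ring

-- ===== A reduced to the normal form =====
lemma pvA_eq (entries : List (List (String × String))) :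
    detect_port_scans entries = pvKeyCount (entries.filterMap pvExtract) := by
  simp only [detect_port_scans]
  rw [pvFoldA]
  set l := entries.filterMap pvExtract with hl
  set G := l.foldl (fun d p => d.modify p.1 PySem.Set.empty (fun s => PySem.Set.add s p.2))
    PySem.Dict.empty with hG
  have hkeys : G.keys = PySem.Set.ofList (l.map Prod.fst) := by
    have h1 : G.keys = PySem.Set.update PySem.Dict.empty.keys (l.map Prod.fst) :=
      PySem.Dict.keys_foldl_modify_key l Prod.fst PySem.Set.empty
        (fun _ p s => PySem.Set.add s p.2) PySem.Dict.empty
    rw [h1, PySem.Dict.keys_empty, PySem.Set.update_nil_left]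
  have hnd : G.keys.Nodup :=
    PySem.Dict.nodup_keys_foldl_modify_key l Prod.fst PySem.Set.empty
      (fun _ p s => PySem.Set.add s p.2) PySem.Dict.empty PySem.Dict.nodup_keys_empty
  have hitems : G.items = G.keys.map (fun k => (k, G.getD k PySem.Set.empty)) :=
    PySem.Dict.items_eq_map_keys G hnd PySem.Set.empty
  have hgetD : ∀ k, G.getD k PySem.Set.empty
      = PySem.Set.ofList ((l.filter (fun q => q.1 == k)).map Prod.snd) := by
    intro k
    have he : (PySem.Set.empty : PySem.Set String) = [] := rfl
    rw [hG, pvGetD_group, PySem.Dict.getD_empty, he, PySem.Set.update_nil_left]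
  rw [hitems, hkeys, List.foldl_map]
  have hbody : ∀ (acc : Int), ∀ k ∈ PySem.Set.ofList (l.map Prod.fst),
      (if PySem.Set.len (G.getD k PySem.Set.empty) > 10 then acc + 1 else acc)
        = (if pvBig l k then acc + 1 else acc) := by
    intro acc k _
    rw [hgetD k]
    by_cases h : PySem.Set.len (PySem.Set.ofList ((l.filter (fun q => q.1 == k)).map Prod.snd)) > 10
    · simp [pvBig, h]
    · simp [pvBig, h]
  rw [PySem.List.foldl_congr_mem _ _ _ _ hbody, pvFoldl_count, pvKeyCount]
  simp

-- ===== B's recursion reduced to the normal form =====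
lemma pvMapFst_filter (rest : List (String × String)) (a : String) :
    (rest.map Prod.fst).filter (fun y => y != a)
      = (rest.filter (fun q => q.1 != a)).map Prod.fst := by
  induction rest with
  | nil => rfl
  | cons q qs ih => by_cases hq : q.1 = a <;> simp [List.filter_cons, hq, ih]

lemma pvBig_filter_ne (rest : List (String × String)) (a k : String) (hk : k ≠ a) (p : String × String) (hp : p.1 = a) :
    pvBig (p :: rest) k = pvBig (rest.filter (fun q => q.1 != a)) k := by
  have hfilter : (p :: rest).filter (fun q => q.1 == k)
      = (rest.filter (fun q => q.1 != a)).filter (fun q => q.1 == k) := by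
    rw [List.filter_filter, List.filter_cons]
    have hpk : (p.1 == k) = false := by simp [hp, Ne.symm hk]
    rw [hpk]
    simp only [Bool.false_eq_true, if_false]
    apply List.filter_congr
    intro q _
    by_cases hq : q.1 = k
    · simp [hq, hk]
    · simp [hq]
  unfold pvBig
  rw [hfilter]

lemma pvScan_eq (l : List (String × String)) : pvScan l = pvKeyCount l := by
  induction hn : l.length using Nat.strong_induction_on generalizing l with
  | _ n ih =>
  cases l with
  | nil => simp [pvScan, pvKeyCount]
  | cons p rest =>
      have hothers : (p :: rest).filter (fun q => q.1 != p.1)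
          = rest.filter (fun q => q.1 != p.1) := by
        simp [List.filter_cons]
      have hlen : (rest.filter (fun q => q.1 != p.1)).length < n := by
        subst hn
        exact Nat.lt_succ_of_le (List.length_filter_le _ _)
      have hihs : pvScan (rest.filter (fun q => q.1 != p.1))
          = pvKeyCount (rest.filter (fun q => q.1 != p.1)) :=
        ih _ hlen _ rfl
      rw [pvScan, hothers, hihs]
      -- now compare the two normal forms
      have hkeys : PySem.Set.ofList ((p :: rest).map Prod.fst)
          = p.1 :: PySem.Set.ofList (((rest.filter (fun q => q.1 != p.1)).map Prod.fst)) := by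
        rw [List.map_cons, PySem.Set.ofList_cons]
        congr 1
        have hd : (PySem.Set.ofList (rest.map Prod.fst)).discard p.1
            = (PySem.Set.ofList (rest.map Prod.fst)).filter (fun y => y != p.1) := rfl
        rw [hd, pvOfList_filter, pvMapFst_filter]
      unfold pvKeyCount
      rw [hkeys, List.countP_cons]
      have hcongr : (PySem.Set.ofList ((rest.filter (fun q => q.1 != p.1)).map Prod.fst)).countP
            (pvBig (p :: rest))
          = (PySem.Set.ofList ((rest.filter (fun q => q.1 != p.1)).map Prod.fst)).countP
            (pvBig (rest.filter (fun q => q.1 != p.1))) := by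
        apply List.countP_congr
        intro k hkmem
        have hmem := (PySem.Set.mem_ofList _ k).mp hkmem
        rcases List.mem_map.mp hmem with ⟨q, hq, hqk⟩
        have h2 := (List.mem_filter.mp hq).2
        have hk : k ≠ p.1 := by rw [← hqk]; simpa using h2
        rw [pvBig_filter_ne rest p.1 k hk p rfl]
      rw [hcongr]
      push_cast
      by_cases h : PySem.Set.len (PySem.Set.ofList (((p :: rest).filter (fun q => q.1 == p.1)).map Prod.snd)) > 10
      · simp [pvBig, h]
        omega
      · simp only [pvBig, decide_eq_true_eq]
        ring

-- ===== VERDICT (by name: the statement is the Claim_ definition above) =====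
theorem detect_port_scans_spec : Claim_equal_detect_port_scans := by
  intro entries _
  show detect_port_scans entries = detect_port_scans_alt entries
  rw [pvA_eq, detect_port_scans_alt, pvFoldB, List.nil_append, pvScan_eq]
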